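-- pv_equiv track=rewrite | github.com/yyfsunnyboy/Mathproject_tvet_mathB | core/math_solvers/radical_solver.py | _multiply_term_dicts
-- ===== SOURCE A (Python) =====
-- from typing import Dict, List, Tuple, Union
--
-- RadObj = Tuple[int, int]        # (coefficient, radicand) — both pure integers
--
-- TermsDict = Dict[int, int]      # {radicand: coefficient}
--
-- def _prime_factors(n: int) -> Dict[int, int]:
--     """Return the prime factorisation of |n| as {prime: exponent}."""
--     n = abs(int(n))
--     factors: Dict[int, int] = {}
--     d = 2
--     while d * d <= n:
--         while n % d == 0:
--             factors[d] = factors.get(d, 0) + 1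
--             n //= d
--         d += 1
--     if n > 1:
--         factors[n] = factors.get(n, 0) + 1
--     return factors
--
-- def _simplify_rad(coeff: int, radicand: int) -> RadObj:
--     """
--     Symbolically simplify c·√r → (new_c, new_r) using integer arithmetic.
--
--     Algorithm: extract all pairs of prime factors from radicand.
--     Example: simplify_rad(2, 18) → 2·√18 = 2·√(9·2) = 2·3·√2 = (6, 2)
--     """
--     if radicand == 0:
--         return (0, 0)
--     if radicand == 1:
--         return (coeff, 1)
--     factors = _prime_factors(radicand)
--     out_factor = 1
--     new_radicand = 1
--     for p, exp in factors.items():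
--         out_factor *= p ** (exp // 2)
--         new_radicand *= p ** (exp % 2)
--     return (coeff * out_factor, new_radicand)
--
-- def _merge_terms(terms: TermsDict) -> TermsDict:
--     """Remove zero-coefficient entries and return a clean TermsDict."""
--     return {r: c for r, c in terms.items() if c != 0}
--
-- def _multiply_term_dicts(t1: TermsDict, t2: TermsDict) -> TermsDict:
--     """Expand the product of two radical expressions, simplifying each term."""
--     result: TermsDict = {}
--     for r1, c1 in t1.items():
--         for r2, c2 in t2.items():
--             if c1 == 0 or c2 == 0:
--                 continue
--             new_c, new_r = _simplify_rad(c1 * c2, r1 * r2)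
--             result[new_r] = result.get(new_r, 0) + new_c
--     return _merge_terms(result)
-- ===== SOURCE B (Python) =====
-- # B: factor each distinct radicand once, then combine exponent maps per pair
-- # (instead of re-factoring every product r1*r2); same results, same order.
--
-- def _prime_factors_cached(n):
--     """Trial-division factorisation of |n| as {prime: exponent}."""
--     n = abs(n)
--     f = {}
--     d = 2
--     while d * d <= n:
--         while n % d == 0:
--             f[d] = f.get(d, 0) + 1
--             n //= d
--         d += 1
--     if n > 1:
--         f[n] = f.get(n, 0) + 1
--     return f
--
-- def _multiply_term_dicts(t1, t2):
--     """Expand the product of two radical expressions, simplifying each term."""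
--     cache = {}
--     for r in list(t1) + list(t2):
--         if r not in cache:
--             cache[r] = _prime_factors_cached(r)
--     result = {}
--     for r1, c1 in t1.items():
--         f1 = cache[r1]
--         for r2, c2 in t2.items():
--             if c1 == 0 or c2 == 0:
--                 continue
--             if r1 == 0 or r2 == 0:
--                 new_c, new_r = 0, 0
--             else:
--                 merged = dict(f1)
--                 for p, e in cache[r2].items():
--                     merged[p] = merged.get(p, 0) + e
--                 out = 1
--                 rad = 1
--                 for p, e in merged.items():
--                     out *= p ** (e // 2)
--                     rad *= p ** (e % 2)
--                 new_c, new_r = c1 * c2 * out, rad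
--             result[new_r] = result.get(new_r, 0) + new_c
--     return {r: c for r, c in result.items() if c != 0}
-- ===== Notes on version B (the rewrite author's own statement) =====
-- stated objective: faster
-- what changed: B factors each distinct radicand once into a cached prime-exponent map and, per term pair, adds the two exponent maps to simplify sqrt(r1*r2), instead of A's re-running trial division on every product r1*r2.
import Mathlib
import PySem

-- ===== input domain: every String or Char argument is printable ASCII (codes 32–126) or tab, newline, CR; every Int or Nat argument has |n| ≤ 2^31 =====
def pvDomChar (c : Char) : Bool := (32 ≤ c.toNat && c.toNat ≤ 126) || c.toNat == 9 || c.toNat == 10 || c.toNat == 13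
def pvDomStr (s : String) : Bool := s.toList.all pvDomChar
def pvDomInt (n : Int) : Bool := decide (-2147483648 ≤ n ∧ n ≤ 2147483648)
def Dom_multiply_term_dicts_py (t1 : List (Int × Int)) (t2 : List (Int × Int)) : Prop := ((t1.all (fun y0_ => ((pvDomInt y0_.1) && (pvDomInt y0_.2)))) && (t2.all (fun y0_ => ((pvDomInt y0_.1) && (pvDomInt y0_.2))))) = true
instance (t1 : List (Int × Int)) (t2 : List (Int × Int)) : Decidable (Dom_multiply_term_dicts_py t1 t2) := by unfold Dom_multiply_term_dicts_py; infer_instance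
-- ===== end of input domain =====

-- B factors each distinct radicand once and combines exponent maps per pair, instead of
-- re-factoring every product r1*r2 (A); same values, same output order — objective: faster.

-- ===== PORT A =====

/-- Inner `while n % d == 0` loop of `_prime_factors` (shared text with B's
`_prime_factors_cached`).  The `2 ≤ d ∧ 1 ≤ n` part of the guard only makes the recursion
total: every actual call has `d ≥ 2` and `n ≥ 1`, where it is the Python condition. -/
def pfInner (n d : Nat) (fd : PySem.Dict Nat Nat) : Nat × PySem.Dict Nat Nat :=
  if h : 2 ≤ d ∧ 1 ≤ n ∧ n % d = 0 then
    pfInner (n / d) d (fd.insert d (fd.getD d 0 + 1))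
  else (n, fd)
termination_by n
decreasing_by exact Nat.div_lt_self (by omega) (by omega)

/-- Needed by `pfOuter`'s termination proof. -/
theorem pfInner_fst_le (n d : Nat) (fd : PySem.Dict Nat Nat) : (pfInner n d fd).1 ≤ n := by
  fun_induction pfInner n d fd with
  | case1 n fd h ih => exact le_trans ih (Nat.le_of_lt (Nat.div_lt_self (by omega) (by omega)))
  | case2 n fd h => exact le_refl n

/-- Outer `while d * d <= n` loop of `_prime_factors`; same totality guard `2 ≤ d`. -/
def pfOuter (n d : Nat) (fd : PySem.Dict Nat Nat) : Nat × PySem.Dict Nat Nat :=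
  if h : 2 ≤ d ∧ d * d ≤ n then
    let p := pfInner n d fd
    pfOuter p.1 (d + 1) p.2
  else (n, fd)
termination_by n + 1 - d
decreasing_by
  have h1 : (pfInner n d fd).1 ≤ n := pfInner_fst_le n d fd
  have h2 : 2 * d ≤ d * d := Nat.mul_le_mul_right d h.1
  omega

/-- `_prime_factors(m)` : trial division of `abs(m)`, `{prime: exponent}` dict. -/
def primeFactorsA (m : Int) : PySem.Dict Nat Nat :=
  let p := pfOuter m.natAbs 2 PySem.Dict.empty
  if 1 < p.1 then p.2.insert p.1 (p.2.getD p.1 0 + 1) else p.2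

/-- `_simplify_rad(coeff, radicand)`. -/
def simplifyRadA (coeff radicand : Int) : Int × Int :=
  if radicand = 0 then (0, 0)
  else if radicand = 1 then (coeff, 1)
  else
    let pr := (primeFactorsA radicand).items.foldl
      (fun (acc : Nat × Nat) pe => (acc.1 * pe.1 ^ (pe.2 / 2), acc.2 * pe.1 ^ (pe.2 % 2))) (1, 1)
    (coeff * (pr.1 : Int), (pr.2 : Int))

/-- Port of A's `_multiply_term_dicts` (the dict arguments arrive as association lists and
are decoded with Python's dict construction rule: last value wins, first position kept). -/
def multiply_term_dicts_py (t1 : List (Int × Int)) (t2 : List (Int × Int)) : List (Int × Int) :=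
  let d1 := PySem.Dict.ofList t1
  let d2 := PySem.Dict.ofList t2
  let result := d1.items.foldl (fun res p1 =>
    d2.items.foldl (fun res p2 =>
      if p1.2 = 0 ∨ p2.2 = 0 then res
      else
        let s := simplifyRadA (p1.2 * p2.2) (p1.1 * p2.1)
        res.insert s.2 (res.getD s.2 0 + s.1)) res) PySem.Dict.empty
  result.items.filter (fun rc => rc.2 != 0)  -- `_merge_terms`

-- ===== PORT B =====

/-- B's cache: `_prime_factors_cached` (textually A's helper) once per distinct radicand. -/
def buildCacheB (ks : List Int) : PySem.Dict Int (PySem.Dict Nat Nat) :=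
  ks.foldl (fun c r => if c.contains r then c else c.insert r (primeFactorsA r)) PySem.Dict.empty

/-- `merged[p] = merged.get(p, 0) + e` over the second factor dict. -/
def mergeAddB (f1 f2 : PySem.Dict Nat Nat) : PySem.Dict Nat Nat :=
  f2.items.foldl (fun m pe => m.insert pe.1 (m.getD pe.1 0 + pe.2)) f1

/-- `out`/`rad` products over a merged exponent map. -/
def outRadB (m : PySem.Dict Nat Nat) : Nat × Nat :=
  m.items.foldl (fun (acc : Nat × Nat) pe => (acc.1 * pe.1 ^ (pe.2 / 2), acc.2 * pe.1 ^ (pe.2 % 2))) (1, 1)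

/-- Port of B (Source B): factor each distinct radicand once, merge exponent maps per pair.
(`cache[r]` always hits; the `.getD ∅` default is never used.) -/
def multiply_term_dicts_py_alt (t1 : List (Int × Int)) (t2 : List (Int × Int)) : List (Int × Int) :=
  let d1 := PySem.Dict.ofList t1
  let d2 := PySem.Dict.ofList t2
  let cache := buildCacheB (d1.keys ++ d2.keys)
  let result := d1.items.foldl (fun res p1 =>
    let f1 := (cache.get? p1.1).getD PySem.Dict.empty
    d2.items.foldl (fun res p2 =>
      if p1.2 = 0 ∨ p2.2 = 0 then res
      else
        let s : Int × Int :=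
          if p1.1 = 0 ∨ p2.1 = 0 then (0, 0)
          else
            let pr := outRadB (mergeAddB f1 ((cache.get? p2.1).getD PySem.Dict.empty))
            (p1.2 * p2.2 * (pr.1 : Int), (pr.2 : Int))
        res.insert s.2 (res.getD s.2 0 + s.1)) res) PySem.Dict.empty
  result.items.filter (fun rc => rc.2 != 0)

-- ===== PRECONDITION & SPEC =====
def Spec_multiply_term_dicts_py (t1 : List (Int × Int)) (t2 : List (Int × Int)) (out : List (Int × Int)) : Prop := out = multiply_term_dicts_py_alt t1 t2
instance (t1 : List (Int × Int)) (t2 : List (Int × Int)) (out : List (Int × Int)) : Decidable (Spec_multiply_term_dicts_py t1 t2 out) := by unfold Spec_multiply_term_dicts_py; infer_instance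

-- ===== CLAIM (what is proved, stated in full; the proofs are below) =====
def Claim_equal_multiply_term_dicts_py : Prop := ∀ (t1 : List (Int × Int)) (t2 : List (Int × Int)), Dom_multiply_term_dicts_py t1 t2 → Spec_multiply_term_dicts_py t1 t2 (multiply_term_dicts_py t1 t2)

-- ===== LEMMAS AND PROOFS =====

/-- Product of `p ^ e` over an exponent-map item list. -/
def pprod (l : List (Nat × Nat)) : Nat := (l.map (fun pe => pe.1 ^ pe.2)).prod

/-- `l` is the item list of a prime factorisation of `n`. -/
def Represents (l : List (Nat × Nat)) (n : Nat) : Prop :=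
  (l.map Prod.fst).Nodup ∧ (∀ pe ∈ l, Nat.Prime pe.1 ∧ 1 ≤ pe.2) ∧ pprod l = n

theorem foldl_outrad (l : List (Nat × Nat)) (a b : Nat) :
    l.foldl (fun (acc : Nat × Nat) pe => (acc.1 * pe.1 ^ (pe.2 / 2), acc.2 * pe.1 ^ (pe.2 % 2))) (a, b)
      = (a * (l.map (fun pe => pe.1 ^ (pe.2 / 2))).prod, b * (l.map (fun pe => pe.1 ^ (pe.2 % 2))).prod) := by
  induction l generalizing a b with
  | nil => simp
  | cons x xs ih => simp [ih, mul_assoc]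

theorem outRadB_eq (m : PySem.Dict Nat Nat) :
    outRadB m = ((m.items.map (fun pe => pe.1 ^ (pe.2 / 2))).prod,
                 (m.items.map (fun pe => pe.1 ^ (pe.2 % 2))).prod) := by
  unfold outRadB
  rw [foldl_outrad, one_mul, one_mul]

theorem outRadB_congr (m m' : PySem.Dict Nat Nat) (h : m.items.Perm m'.items) :
    outRadB m = outRadB m' := by
  rw [outRadB_eq, outRadB_eq, (h.map _).prod_eq, (h.map _).prod_eq]

theorem pprod_ne_zero (l : List (Nat × Nat)) (h : ∀ pe ∈ l, Nat.Prime pe.1 ∧ 1 ≤ pe.2) :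
    pprod l ≠ 0 := by
  induction l with
  | nil => simp [pprod]
  | cons x xs ih =>
      have hx := h x (by simp)
      have hxs := ih (fun pe hpe => h pe (List.mem_cons_of_mem _ hpe))
      simp only [pprod, List.map_cons, List.prod_cons] at *
      exact mul_ne_zero (pow_ne_zero _ hx.1.pos.ne') hxs

theorem prime_dvd_pprod (l : List (Nat × Nat)) (q : Nat) (hq : Nat.Prime q)
    (h : ∀ pe ∈ l, Nat.Prime pe.1) (hd : q ∣ pprod l) : q ∈ l.map Prod.fst := by
  induction l with
  | nil =>
      exact absurd (Nat.eq_one_of_dvd_one (by simpa [pprod] using hd)) hq.ne_one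
  | cons x xs ih =>
      simp only [pprod, List.map_cons, List.prod_cons] at hd
      rcases (Nat.Prime.dvd_mul hq).mp hd with h1 | h2
      · have : q = x.1 := (Nat.prime_dvd_prime_iff_eq hq (h x (by simp))).mp (hq.dvd_of_dvd_pow h1)
        simp [this]
      · exact List.mem_cons_of_mem _ (ih (fun pe hpe => h pe (List.mem_cons_of_mem _ hpe)) h2)

theorem pprod_factorization (l : List (Nat × Nat)) (hnd : (l.map Prod.fst).Nodup)
    (hent : ∀ pe ∈ l, Nat.Prime pe.1 ∧ 1 ≤ pe.2) :
    ∀ pe ∈ l, (pprod l).factorization pe.1 = pe.2 := by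
  induction l with
  | nil => simp
  | cons x xs ih =>
      have hxp := (hent x (by simp)).1
      have hnd' : (xs.map Prod.fst).Nodup := (List.nodup_cons.mp hnd).2
      have hx1 : x.1 ∉ xs.map Prod.fst := (List.nodup_cons.mp hnd).1
      have hent' : ∀ pe ∈ xs, Nat.Prime pe.1 ∧ 1 ≤ pe.2 :=
        fun pe hpe => hent pe (List.mem_cons_of_mem _ hpe)
      have hprodeq : pprod (x :: xs) = x.1 ^ x.2 * pprod xs := by
        simp [pprod]
      have hfac : (pprod (x :: xs)).factorization
          = (x.1 ^ x.2).factorization + (pprod xs).factorization := by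
        rw [hprodeq]
        exact Nat.factorization_mul (pow_ne_zero _ hxp.pos.ne') (pprod_ne_zero xs hent')
      intro pe hpe
      rcases List.mem_cons.mp hpe with rfl | hpe'
      · have h0 : (pprod xs).factorization pe.1 = 0 := by
          apply Nat.factorization_eq_zero_of_not_dvd
          intro hdvd
          exact hx1 (prime_dvd_pprod xs pe.1 hxp (fun q hq => (hent' q hq).1) hdvd)
        rw [hfac]
        simp [hxp.factorization_pow, h0]
      · have hne : x.1 ≠ pe.1 := by
          intro heq
          exact hx1 (heq ▸ List.mem_map.mpr ⟨pe, hpe', rfl⟩)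
        rw [hfac]
        simp [hxp.factorization_pow, hne, ih hnd' hent' pe hpe']

theorem represents_val (l : List (Nat × Nat)) (n : Nat) (h : Represents l n) :
    ∀ pe ∈ l, pe.2 = n.factorization pe.1 := by
  obtain ⟨hnd, hent, hprod⟩ := h
  intro pe hpe
  rw [← hprod]
  exact (pprod_factorization l hnd hent pe hpe).symm

theorem represents_mem_fst (l : List (Nat × Nat)) (n : Nat) (h : Represents l n) (p : Nat) :
    p ∈ l.map Prod.fst ↔ Nat.Prime p ∧ p ∣ n := by
  obtain ⟨hnd, hent, hprod⟩ := h
  constructor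
  · intro hp
    obtain ⟨pe, hpe, rfl⟩ := List.mem_map.mp hp
    refine ⟨(hent pe hpe).1, ?_⟩
    apply Nat.dvd_of_factorization_pos
    rw [← hprod]
    have h1 := pprod_factorization l hnd hent pe hpe
    have h2 := (hent pe hpe).2
    omega
  · rintro ⟨hp, hd⟩
    exact prime_dvd_pprod l p hp (fun pe hpe => (hent pe hpe).1) (hprod ▸ hd)

theorem represents_perm (l l' : List (Nat × Nat)) (n : Nat)
    (h : Represents l n) (h' : Represents l' n) : l.Perm l' := by
  have fsteq : ∀ m : List (Nat × Nat), Represents m n →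
      m = (m.map Prod.fst).map (fun p => (p, n.factorization p)) := by
    intro m hm
    rw [List.map_map]
    conv_lhs => rw [← List.map_id m]
    apply List.map_congr_left
    intro pe hpe
    have := represents_val m n hm pe hpe
    simp [Function.comp, Prod.ext_iff, this]
  have hfstperm : (l.map Prod.fst).Perm (l'.map Prod.fst) := by
    apply List.perm_of_nodup_nodup_toFinset_eq h.1 h'.1
    ext p
    simp only [List.mem_toFinset]
    rw [represents_mem_fst l n h p, represents_mem_fst l' n h' p]
  rw [fsteq l h, fsteq l' h']
  exact hfstperm.map _

theorem represents_one (l : List (Nat × Nat)) (h : Represents l 1) : l = [] := by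
  obtain ⟨hnd, hent, hprod⟩ := h
  cases l with
  | nil => rfl
  | cons x xs =>
      exfalso
      have hx := hent x (by simp)
      simp only [pprod, List.map_cons, List.prod_cons] at hprod
      have hone : x.1 ^ x.2 = 1 := Nat.eq_one_of_dvd_one ⟨_, hprod.symm⟩
      rcases (Nat.pow_eq_one.mp hone) with h1 | h1
      · exact hx.1.ne_one h1
      · omega

/-- Characterisation of the inner division loop. -/
theorem pfInner_spec (d : Nat) (hd : 2 ≤ d) :
    ∀ n, 1 ≤ n → ∀ fd : PySem.Dict Nat Nat, ∃ e n',
      pfInner n d fd = (n', if e = 0 then fd else fd.insert d (fd.getD d 0 + e)) ∧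
      n = d ^ e * n' ∧ ¬ d ∣ n' ∧ 1 ≤ n' := by
  intro n
  induction n using Nat.strong_induction_on with
  | _ n ih =>
    intro hn fd
    by_cases hdvd : d ∣ n
    · have hguard : 2 ≤ d ∧ 1 ≤ n ∧ n % d = 0 := ⟨hd, hn, Nat.mod_eq_zero_of_dvd hdvd⟩
      rw [pfInner.eq_def, dif_pos hguard]
      have hlt : n / d < n := Nat.div_lt_self (by omega) (by omega)
      have hn1 : 1 ≤ n / d := Nat.div_pos (Nat.le_of_dvd (by omega) hdvd) (by omega)
      obtain ⟨e, n', heq, hfac, hnd, hge⟩ := ih (n / d) hlt hn1 (fd.insert d (fd.getD d 0 + 1))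
      refine ⟨e + 1, n', ?_, ?_, hnd, hge⟩
      · rw [heq]
        by_cases he : e = 0
        · subst he; simp
        · rw [if_neg he, if_neg (by omega), PySem.Dict.getD_insert_self,
            PySem.Dict.insert_insert_self]
          congr 2
          omega
      · calc n = d * (n / d) := (Nat.mul_div_cancel' hdvd).symm
          _ = d * (d ^ e * n') := by rw [hfac]
          _ = d ^ (e + 1) * n' := by ring
    · have hguard : ¬ (2 ≤ d ∧ 1 ≤ n ∧ n % d = 0) := by
        intro hc
        exact hdvd (Nat.dvd_of_mod_eq_zero hc.2.2)
      rw [pfInner.eq_def, dif_neg hguard]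
      exact ⟨0, n, by simp, by simp, hdvd, hn⟩

/-- Main invariant of the trial-division loop, phrased on the post-loop finalisation. -/
theorem pprod_append (l1 l2 : List (Nat × Nat)) : pprod (l1 ++ l2) = pprod l1 * pprod l2 := by
  simp [pprod]

/-- Main invariant of the trial-division loop, phrased on the post-loop finalisation. -/
theorem pfOuter_spec (n d : Nat) (fd : PySem.Dict Nat Nat) (N : Nat) :
    2 ≤ d → 1 ≤ n →
    (fd.items.map Prod.fst).Nodup →
    (∀ pe ∈ fd.items, Nat.Prime pe.1 ∧ 1 ≤ pe.2 ∧ pe.1 < d) →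
    pprod fd.items * n = N →
    (∀ k, 2 ≤ k → k < d → ¬ k ∣ n) →
    Represents (if 1 < (pfOuter n d fd).1 then
        ((pfOuter n d fd).2.insert (pfOuter n d fd).1 ((pfOuter n d fd).2.getD (pfOuter n d fd).1 0 + 1)).items
      else (pfOuter n d fd).2.items) N := by
  fun_induction pfOuter n d fd with
  | case1 n d fd h p ih =>
    intro hd hn hkeys hent hprod hndvd
    obtain ⟨e, n', heq, hfac, hnd', hn'⟩ := pfInner_spec d h.1 n hn fd
    have hp : p = (n', if e = 0 then fd else fd.insert d (fd.getD d 0 + e)) := heq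
    have hdict : p.2 = if e = 0 then fd else fd.insert d (fd.getD d 0 + e) := by rw [hp]
    have hfst : p.1 = n' := by rw [hp]
    have hnsub : n' ∣ n := ⟨d ^ e, by rw [hfac]; ring⟩
    have hndvd' : ∀ k, 2 ≤ k → k < d + 1 → ¬ k ∣ n' := by
      intro k hk2 hklt hkd
      rcases Nat.lt_or_ge k d with hlt | hge
      · exact hndvd k hk2 hlt (hkd.trans hnsub)
      · have : k = d := by omega
        exact hnd' (this ▸ hkd)
    rw [hfst] at ih ⊢
    rw [hdict] at ih ⊢
    by_cases he : e = 0
    · rw [if_pos he] at ih ⊢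
      have hfe : n' = n := by rw [hfac, he]; ring
      rw [hfe] at hndvd' ih ⊢
      exact ih (by omega) hn hkeys
        (fun pe hpe => ⟨(hent pe hpe).1, (hent pe hpe).2.1, by have := (hent pe hpe).2.2; omega⟩)
        hprod hndvd'
    · rw [if_neg he] at ih ⊢
      -- d is prime: it divides n and has no divisor in [2, d)
      have hdn : d ∣ n := by
        rw [hfac]
        exact Dvd.dvd.mul_right (dvd_pow_self d he) n'
      have hdp : Nat.Prime d := by
        rw [Nat.prime_def_lt]
        refine ⟨h.1, fun m hmlt hmd => ?_⟩
        by_contra hm1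
        have hm0 : m ≠ 0 := by rintro rfl; simp at hmd; omega
        exact hndvd m (by omega) hmlt (hmd.trans hdn)
      have hdkey : fd.contains d = false := by
        rw [← Bool.not_eq_true, PySem.Dict.contains_iff_mem_keys]
        intro hmem
        simp only [PySem.Dict.keys] at hmem
        obtain ⟨pe, hpe, rfl⟩ := List.mem_map.mp hmem
        exact absurd (hent pe hpe).2.2 (by omega)
      have hgetD : fd.getD d 0 = 0 := PySem.Dict.getD_of_not_contains fd 0 hdkey
      have hitems : (fd.insert d (fd.getD d 0 + e)).items = fd.items ++ [(d, e)] := by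
        rw [PySem.Dict.items_insert_of_not_contains (h := hdkey), hgetD, Nat.zero_add]
      apply ih (by omega) hn'
      · rw [hitems, List.map_append]
        simp only [List.map_cons, List.map_nil, List.nodup_append]
        refine ⟨hkeys, List.nodup_singleton d, ?_⟩
        intro a ha b hb hab
        rw [List.mem_singleton] at hb
        subst hb
        subst hab
        obtain ⟨pe, hpe, rfl⟩ := List.mem_map.mp ha
        exact absurd (hent pe hpe).2.2 (by omega)
      · intro pe hpe
        rw [hitems] at hpe
        rcases List.mem_append.mp hpe with hold | hnew
        · exact ⟨(hent pe hold).1, (hent pe hold).2.1, by have := (hent pe hold).2.2; omega⟩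
        · simp only [List.mem_singleton] at hnew
          subst hnew
          exact ⟨hdp, by omega, by omega⟩
      · rw [hitems, pprod_append, ← hprod, hfac]
        simp only [pprod, List.map_cons, List.map_nil, List.prod_cons, List.prod_nil]
        ring
      · exact hndvd'
  | case2 n d fd h =>
    intro hd hn hkeys hent hprod hndvd
    have hlt : n < d * d := by omega
    by_cases h1 : 1 < n
    · rw [if_pos h1]
      -- n is prime: all its nontrivial divisors are ≥ d, but n < d * d
      have hnp : Nat.Prime n := by
        rw [Nat.prime_def_lt]
        refine ⟨h1, fun m hmlt hmd => ?_⟩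
        by_contra hm1
        have hm0 : m ≠ 0 := by rintro rfl; rw [Nat.zero_dvd] at hmd; omega
        have hm2 : 2 ≤ m := by omega
        have hmge : d ≤ m := by
          by_contra hc
          exact hndvd m hm2 (by omega) hmd
        obtain ⟨k, hk⟩ := hmd
        have hkd : k ∣ n := ⟨m, by rw [hk]; ring⟩
        have hk0 : k ≠ 0 := by intro h0; rw [h0, Nat.mul_zero] at hk; omega
        have hk1 : k ≠ 1 := by intro h1k; rw [h1k, Nat.mul_one] at hk; omega
        have hkge : d ≤ k := by
          by_contra hc
          exact hndvd k (by omega) (by omega) hkd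
        have hdd : d * d ≤ m * k := Nat.mul_le_mul hmge hkge
        rw [← hk] at hdd
        omega
      have hnged : d ≤ n := by
        by_contra hc
        exact hndvd n (by omega) (by omega) (dvd_refl n)
      have hnkey : fd.contains n = false := by
        rw [← Bool.not_eq_true, PySem.Dict.contains_iff_mem_keys]
        intro hmem
        simp only [PySem.Dict.keys] at hmem
        obtain ⟨pe, hpe, rfl⟩ := List.mem_map.mp hmem
        have := (hent pe hpe).2.2
        omega
      have hgetD : fd.getD n 0 = 0 := PySem.Dict.getD_of_not_contains fd 0 hnkey
      have hitems : (fd.insert n (fd.getD n 0 + 1)).items = fd.items ++ [(n, 1)] := by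
        rw [PySem.Dict.items_insert_of_not_contains (h := hnkey), hgetD, Nat.zero_add]
      rw [hitems]
      refine ⟨?_, ?_, ?_⟩
      · rw [List.map_append]
        simp only [List.map_cons, List.map_nil, List.nodup_append]
        refine ⟨hkeys, List.nodup_singleton n, ?_⟩
        intro a ha b hb hab
        rw [List.mem_singleton] at hb
        subst hb
        subst hab
        obtain ⟨pe, hpe, rfl⟩ := List.mem_map.mp ha
        have := (hent pe hpe).2.2
        omega
      · intro pe hpe
        rcases List.mem_append.mp hpe with hold | hnew
        · exact ⟨(hent pe hold).1, (hent pe hold).2.1⟩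
        · simp only [List.mem_singleton] at hnew
          subst hnew
          exact ⟨hnp, le_refl 1⟩
      · rw [pprod_append, ← hprod]
        simp only [pprod, List.map_cons, List.map_nil, List.prod_cons, List.prod_nil]
        ring
    · rw [if_neg h1]
      have : n = 1 := by omega
      subst this
      exact ⟨hkeys, fun pe hpe => ⟨(hent pe hpe).1, (hent pe hpe).2.1⟩, by simpa using hprod⟩

theorem represents_primeFactorsA (m : Int) (hm : m ≠ 0) :
    Represents (primeFactorsA m).items m.natAbs := by
  unfold primeFactorsA
  rw [apply_ite PySem.Dict.items]
  apply pfOuter_spec m.natAbs 2 PySem.Dict.empty m.natAbs (le_refl 2)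
    (Int.natAbs_pos.mpr hm)
  · simp [PySem.Dict.empty]
  · simp [PySem.Dict.empty]
  · simp [pprod, PySem.Dict.empty]
  · intro k hk2 hklt
    omega

theorem map_replace_id (l : List (Nat × Nat)) (p v : Nat) (h : p ∉ l.map Prod.fst) :
    l.map (fun q => if q.1 == p then (p, v) else q) = l := by
  induction l with
  | nil => rfl
  | cons x xs ih =>
      simp only [List.map_cons, List.mem_cons] at h ⊢
      have hx : x.1 ≠ p := fun he => h (Or.inl he.symm)
      rw [if_neg (by simpa using hx), ih (fun hm => h (Or.inr hm))]

theorem map_fst_replace (l : List (Nat × Nat)) (p v : Nat) :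
    (l.map (fun q => if q.1 == p then (p, v) else q)).map Prod.fst = l.map Prod.fst := by
  induction l with
  | nil => rfl
  | cons x xs ih =>
      simp only [List.map_cons, ih]
      by_cases hx : x.1 = p
      · rw [if_pos (by simpa using hx)]
        simp [hx]
      · rw [if_neg (by simpa using hx)]

theorem pprod_replace (l : List (Nat × Nat)) (p w v : Nat)
    (hnd : (l.map Prod.fst).Nodup) (hmem : (p, w) ∈ l) :
    pprod (l.map (fun q => if q.1 == p then (p, v) else q)) * p ^ w = pprod l * p ^ v := by
  induction l with
  | nil => simp at hmem
  | cons x xs ih =>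
      have hnd' : (xs.map Prod.fst).Nodup := (List.nodup_cons.mp (by simpa using hnd)).2
      have hx1 : x.1 ∉ xs.map Prod.fst := (List.nodup_cons.mp (by simpa using hnd)).1
      by_cases hx : x.1 = p
      · have hxeq : x = (p, w) := by
          rcases List.mem_cons.mp hmem with h | h
          · exact h.symm
          · exact absurd (List.mem_map.mpr ⟨(p, w), h, rfl⟩) (hx ▸ hx1)
        subst hxeq
        have hid : xs.map (fun q => if q.1 == p then (p, v) else q) = xs :=
          map_replace_id xs p v (hx ▸ hx1)
        simp only [List.map_cons, hid]
        simp only [pprod, List.map_cons, List.prod_cons]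
        rw [if_pos (by simpa using hx)]
        ring
      · have hmem' : (p, w) ∈ xs := by
          rcases List.mem_cons.mp hmem with h | h
          · exact absurd (congrArg Prod.fst h).symm hx
          · exact h
        simp only [List.map_cons]
        rw [if_neg (by simpa using hx)]
        simp only [pprod, List.map_cons, List.prod_cons]
        have hihr := ih hnd' hmem'
        simp only [pprod] at hihr
        rw [mul_assoc, hihr]
        ring

/-- One `merged[p] = merged.get(p, 0) + e` step preserves `Represents`, multiplying by `p^e`. -/
theorem represents_insert_add (m : PySem.Dict Nat Nat) (a : Nat) (hm : Represents m.items a)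
    (p e : Nat) (hp : Nat.Prime p) (he : 1 ≤ e) :
    Represents (m.insert p (m.getD p 0 + e)).items (a * p ^ e) := by
  obtain ⟨hnd, hent, hprod⟩ := hm
  by_cases hc : m.contains p = true
  · have hpk : p ∈ m.keys := (PySem.Dict.contains_iff_mem_keys _ _).mp hc
    have hkeq : m.keys = m.items.map Prod.fst := by rfl
    rw [hkeq] at hpk
    obtain ⟨⟨q1, q2⟩, hpe, hq⟩ := List.mem_map.mp hpk
    simp only at hq
    subst hq
    have hget : m.getD q1 0 = q2 :=
      PySem.Dict.getD_of_mem_items m hpe (by rw [hkeq]; exact hnd) 0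
    rw [PySem.Dict.items_insert_of_contains m _ hc, hget]
    refine ⟨?_, ?_, ?_⟩
    · rw [map_fst_replace]; exact hnd
    · intro q hq
      obtain ⟨q0, hq0, hq0e⟩ := List.mem_map.mp hq
      by_cases hcase : q0.1 = q1
      · rw [if_pos (by simpa using hcase)] at hq0e
        subst hq0e
        exact ⟨hp, by omega⟩
      · rw [if_neg (by simpa using hcase)] at hq0e
        subst hq0e
        exact hent q0 hq0
    · have hrep := pprod_replace m.items q1 q2 (q2 + e) hnd hpe
      have hpow : a * q1 ^ (q2 + e) = (a * q1 ^ e) * q1 ^ q2 := by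
        rw [pow_add]; ring
      rw [hprod, hpow] at hrep
      exact Nat.eq_of_mul_eq_mul_right (Nat.pow_pos hp.pos) hrep
  · have hc' : m.contains p = false := by simpa using hc
    have hget : m.getD p 0 = 0 := PySem.Dict.getD_of_not_contains m 0 hc'
    rw [PySem.Dict.items_insert_of_not_contains (h := hc'), hget, Nat.zero_add]
    refine ⟨?_, ?_, ?_⟩
    · rw [List.map_append]
      simp only [List.map_cons, List.map_nil, List.nodup_append]
      refine ⟨hnd, List.nodup_singleton p, ?_⟩
      intro x hx b hb hab
      rw [List.mem_singleton] at hb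
      subst hb; subst hab
      have : m.contains x = true := by
        rw [PySem.Dict.contains_iff_mem_keys]
        simpa only [PySem.Dict.keys] using hx
      rw [hc'] at this
      exact Bool.false_ne_true this
    · intro q hq
      rcases List.mem_append.mp hq with h | h
      · exact hent q h
      · rw [List.mem_singleton] at h
        subst h
        exact ⟨hp, he⟩
    · rw [pprod_append, hprod]
      simp [pprod]

theorem merge_fold_represents (l : List (Nat × Nat)) :
    ∀ (m : PySem.Dict Nat Nat) (a : Nat), Represents m.items a →
    (∀ pe ∈ l, Nat.Prime pe.1 ∧ 1 ≤ pe.2) →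
    Represents ((l.foldl (fun m pe => m.insert pe.1 (m.getD pe.1 0 + pe.2)) m).items)
      (a * pprod l) := by
  induction l with
  | nil =>
      intro m a h _
      simpa [pprod] using h
  | cons x xs ih =>
      intro m a h hent
      simp only [List.foldl_cons]
      have hx := hent x (by simp)
      have hres := ih _ _ (represents_insert_add m a h x.1 x.2 hx.1 hx.2)
        (fun pe hpe => hent pe (List.mem_cons_of_mem _ hpe))
      have harr : a * x.1 ^ x.2 * pprod xs = a * pprod (x :: xs) := by
        simp only [pprod, List.map_cons, List.prod_cons]
        ring
      rwa [harr] at hres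

theorem represents_mergeAddB (f1 f2 : PySem.Dict Nat Nat) (a b : Nat)
    (h1 : Represents f1.items a) (h2 : Represents f2.items b) :
    Represents (mergeAddB f1 f2).items (a * b) := by
  obtain ⟨hnd2, hent2, hprod2⟩ := h2
  unfold mergeAddB
  rw [← hprod2]
  clear hnd2 hprod2
  exact merge_fold_represents f2.items f1 a h1 hent2

/-- Per-pair agreement: A's `_simplify_rad(c, r1*r2)` equals B's merged-map computation. -/
theorem simplify_pair_eq (c r1 r2 : Int) (h1 : r1 ≠ 0) (h2 : r2 ≠ 0) :
    simplifyRadA c (r1 * r2) =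
      ((c * ((outRadB (mergeAddB (primeFactorsA r1) (primeFactorsA r2))).1 : Int),
        ((outRadB (mergeAddB (primeFactorsA r1) (primeFactorsA r2))).2 : Int))) := by
  have hr : r1 * r2 ≠ 0 := mul_ne_zero h1 h2
  have hrepm : Represents (mergeAddB (primeFactorsA r1) (primeFactorsA r2)).items
      (r1.natAbs * r2.natAbs) :=
    represents_mergeAddB _ _ _ _ (represents_primeFactorsA r1 h1) (represents_primeFactorsA r2 h2)
  have habs : (r1 * r2).natAbs = r1.natAbs * r2.natAbs := Int.natAbs_mul r1 r2
  unfold simplifyRadA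
  rw [if_neg hr]
  by_cases hone : r1 * r2 = 1
  · rw [if_pos hone]
    have habs1 : r1.natAbs * r2.natAbs = 1 := by rw [← habs, hone]; rfl
    rw [habs1] at hrepm
    have hnil := represents_one _ hrepm
    rw [outRadB, hnil]
    simp
  · rw [if_neg hone]
    have hrep1 : Represents (primeFactorsA (r1 * r2)).items (r1.natAbs * r2.natAbs) :=
      habs ▸ represents_primeFactorsA (r1 * r2) hr
    have hperm := represents_perm _ _ _ hrep1 hrepm
    show ((c * ((outRadB (primeFactorsA (r1 * r2))).1 : Int), ((outRadB (primeFactorsA (r1 * r2))).2 : Int))) = _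
    rw [outRadB_congr _ _ hperm]

theorem buildCacheB_fold_inv (ks : List Int) :
    ∀ c : PySem.Dict Int (PySem.Dict Nat Nat),
    (∀ x v, c.get? x = some v → v = primeFactorsA x) →
    ∀ x v, (ks.foldl (fun c r => if c.contains r then c else c.insert r (primeFactorsA r)) c).get? x = some v →
      v = primeFactorsA x := by
  induction ks with
  | nil => intro c hc; exact hc
  | cons k ks ih =>
      intro c hc
      simp only [List.foldl_cons]
      apply ih
      intro x v hxv
      by_cases hk : c.contains k
      · rw [if_pos hk] at hxv
        exact hc x v hxv
      · rw [if_neg hk, PySem.Dict.get?_insert] at hxv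
        by_cases hx : x = k
        · rw [if_pos hx] at hxv
          rw [hx]
          exact (Option.some_injective _ hxv).symm
        · rw [if_neg hx] at hxv
          exact hc x v hxv

theorem buildCacheB_fold_some (ks : List Int) :
    ∀ c : PySem.Dict Int (PySem.Dict Nat Nat), ∀ r,
    (r ∈ ks ∨ (c.get? r).isSome) →
    ((ks.foldl (fun c r => if c.contains r then c else c.insert r (primeFactorsA r)) c).get? r).isSome := by
  induction ks with
  | nil =>
      intro c r h
      rcases h with h | h
      · simp at h
      · exact h
  | cons k ks ih =>
      intro c r h
      simp only [List.foldl_cons]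
      apply ih
      by_cases hrk : r = k
      · right
        subst hrk
        by_cases hk : c.contains r
        · rw [if_pos hk, ← PySem.Dict.contains_eq_isSome_get?]
          exact hk
        · rw [if_neg hk, PySem.Dict.get?_insert, if_pos rfl]
          rfl
      · rcases h with h | h
        · rcases List.mem_cons.mp h with h' | h'
          · exact absurd h' hrk
          · exact Or.inl h'
        · right
          by_cases hk : c.contains k
          · rwa [if_pos hk]
          · rwa [if_neg hk, PySem.Dict.get?_insert, if_neg hrk]

theorem buildCacheB_get (ks : List Int) (r : Int) (hr : r ∈ ks) :
    (buildCacheB ks).get? r = some (primeFactorsA r) := by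
  unfold buildCacheB
  have h2 := buildCacheB_fold_some ks PySem.Dict.empty r (Or.inl hr)
  obtain ⟨v, hv⟩ := Option.isSome_iff_exists.mp h2
  rw [hv]
  rw [buildCacheB_fold_inv ks PySem.Dict.empty (by intro x v h; simp at h) r v hv]

-- ===== VERDICT (by name: the statement is the Claim_ definition above) =====
theorem multiply_term_dicts_py_spec : Claim_equal_multiply_term_dicts_py := by
  intro t1 t2 _
  unfold Spec_multiply_term_dicts_py multiply_term_dicts_py multiply_term_dicts_py_alt
  dsimp only
  apply congrArg (fun d : PySem.Dict Int Int => d.items.filter (fun rc => rc.2 != 0))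
  apply PySem.List.foldl_congr_mem
  intro res p1 hp1
  have hk1 : p1.1 ∈ (PySem.Dict.ofList t1).keys ++ (PySem.Dict.ofList t2).keys :=
    List.mem_append_left _ (List.mem_map.mpr ⟨p1, hp1, rfl⟩)
  rw [buildCacheB_get _ _ hk1, Option.getD_some]
  apply PySem.List.foldl_congr_mem
  intro res2 p2 hp2
  have hk2 : p2.1 ∈ (PySem.Dict.ofList t1).keys ++ (PySem.Dict.ofList t2).keys :=
    List.mem_append_right _ (List.mem_map.mpr ⟨p2, hp2, rfl⟩)
  rw [buildCacheB_get _ _ hk2, Option.getD_some]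
  by_cases hz : p1.2 = 0 ∨ p2.2 = 0
  · rw [if_pos hz, if_pos hz]
  · rw [if_neg hz, if_neg hz]
    by_cases h0 : p1.1 = 0 ∨ p2.1 = 0
    · rw [if_pos h0]
      have : p1.1 * p2.1 = 0 := by
        rcases h0 with h | h <;> rw [h] <;> ring
      rw [show simplifyRadA (p1.2 * p2.2) (p1.1 * p2.1) = (0, 0) by
        rw [this]; unfold simplifyRadA; rw [if_pos rfl]]
    · rw [if_neg h0]
      push_neg at h0
      rw [simplify_pair_eq (p1.2 * p2.2) p1.1 p2.1 h0.1 h0.2]
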